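-- pv_equiv track=rewrite | github.com/kei-nan/NLPCourse | exercise3/main.py | format_line_vector
-- ===== SOURCE A (Python) =====
-- def format_line_vector(vector):
--     text = ''
--     zero_sequence = 0
--     for element in vector:
--         if element == 0:
--             zero_sequence += 1
--             continue
--         if text:
--             text += ', '
--         if zero_sequence > 0:
--             text += '0^{}, '.format(zero_sequence)
--             zero_sequence = 0
--         text += '{}'.format(element)
--     return text
-- ===== SOURCE B (Python) =====
-- def format_line_vector(vector):
--     # group into maximal runs of zero / nonzero, drop a trailing zero run, join tokens
--     runs = []
--     i = 0
--     n = len(vector)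
--     while i < n:
--         j = i
--         iszero = vector[i] == 0
--         while j < n and (vector[j] == 0) == iszero:
--             j += 1
--         runs.append((iszero, vector[i:j]))
--         i = j
--     if runs and runs[-1][0]:
--         runs.pop()
--     tokens = []
--     for iszero, run in runs:
--         if iszero:
--             tokens.append('0^{}'.format(len(run)))
--         else:
--             for e in run:
--                 tokens.append('{}'.format(e))
--     return ', '.join(tokens)
-- ===== Notes on version B (the rewrite author's own statement) =====
-- stated objective: alternative
-- what changed: Replaces A's single stateful accumulator loop (string built in place with a pending zero counter) by a run-length decomposition: split the vector into maximal zero/nonzero runs, drop a trailing zero run, map runs to tokens and join them with ', '.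
import Mathlib
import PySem

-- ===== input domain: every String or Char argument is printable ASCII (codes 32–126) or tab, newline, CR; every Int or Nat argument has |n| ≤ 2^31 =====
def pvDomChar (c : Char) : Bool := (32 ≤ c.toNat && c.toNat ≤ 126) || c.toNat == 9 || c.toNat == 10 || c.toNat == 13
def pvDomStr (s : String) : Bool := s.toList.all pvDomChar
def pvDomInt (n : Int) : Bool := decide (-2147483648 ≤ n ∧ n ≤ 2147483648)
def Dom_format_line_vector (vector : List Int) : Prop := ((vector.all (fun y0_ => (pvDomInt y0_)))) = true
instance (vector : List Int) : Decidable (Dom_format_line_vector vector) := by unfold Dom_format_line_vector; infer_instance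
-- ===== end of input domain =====

-- B replaces A's stateful accumulator loop by a run-length decomposition (split into maximal
-- zero/nonzero runs, drop a trailing zero run, map runs to tokens, join); objective: alternative.

-- ===== PORT A =====
def format_line_vector (vector : List Int) : String :=
  (vector.foldl
    (fun (st : String × Int) element =>
      if element == 0 then
        (st.1, st.2 + 1)
      else
        let text1 := if st.1 ≠ "" then st.1 ++ ", " else st.1
        let text2 := if st.2 > 0 then text1 ++ "0^" ++ PySem.Int.toStr st.2 ++ ", " else text1
        (text2 ++ PySem.Int.toStr element, 0))
    ("", 0)).1

-- ===== PORT B =====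
-- the two nested while loops of Source B: split off the maximal run sharing the head's zero-ness
def pvRuns (l : List Int) : List (Bool × List Int) :=
  match l with
  | [] => []
  | x :: xs =>
    let iszero := x == 0
    (iszero, x :: xs.takeWhile (fun y => (y == 0) == iszero))
      :: pvRuns (xs.dropWhile (fun y => (y == 0) == iszero))
termination_by l.length
decreasing_by
  simpa using Nat.lt_succ_of_le (List.length_dropWhile_le _ _)

-- Source B: "if runs and runs[-1][0]: runs.pop()"
def pvDropTrailing (runs : List (Bool × List Int)) : List (Bool × List Int) :=
  match runs.getLast? with
  | some (true, _) => runs.dropLast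
  | _ => runs

-- Source B: the token-building for loop
def pvTokens (runs : List (Bool × List Int)) : List String :=
  runs.flatMap (fun r =>
    if r.1 then ["0^" ++ PySem.Int.toStr (r.2.length : Int)]
    else r.2.map (fun e => PySem.Int.toStr e))

def format_line_vector_alt (vector : List Int) : String :=
  PySem.Str.join ", " (pvTokens (pvDropTrailing (pvRuns vector)))

-- ===== PRECONDITION & SPEC =====
def Spec_format_line_vector (vector : List Int) (out : String) : Prop := out = format_line_vector_alt vector
instance (vector : List Int) (out : String) : Decidable (Spec_format_line_vector vector out) := by unfold Spec_format_line_vector; infer_instance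

-- ===== CLAIM (what is proved, stated in full; the proofs are below) =====
def Claim_equal_format_line_vector : Prop := ∀ (vector : List Int), Dom_format_line_vector vector → Spec_format_line_vector vector (format_line_vector vector)

-- ===== LEMMAS AND PROOFS =====

def pvSep : List Char := [',', ' ']

-- reference token list: the tokens still to be emitted from suffix `xs` with `z` pending zeros
def pvFTok (z : Int) : List Int → List (List Char)
  | [] => []
  | x :: xs =>
    if x = 0 then pvFTok (z + 1) xs
    else (if 0 < z then [['0', '^'] ++ PySem.Int.toChars z] else [])
           ++ (PySem.Int.toChars x :: pvFTok 0 xs)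

-- how A's accumulated text combines with the tokens still to come
def pvJoinAcc (t : List Char) (ts : List (List Char)) : List Char :=
  match ts with
  | [] => t
  | _ => (if t = [] then [] else t ++ pvSep) ++ PySem.Chars.join pvSep ts

lemma pvToDigitsCore_ne_nil :
    ∀ (f n : Nat) (l : List Char), 0 < f ∨ l ≠ [] → Nat.toDigitsCore 10 f n l ≠ [] := by
  intro f
  induction f with
  | zero =>
    intro n l h
    simpa [Nat.toDigitsCore] using h.resolve_left (by omega)
  | succ f ih =>
    intro n l _
    rw [Nat.toDigitsCore]
    split
    · exact List.cons_ne_nil _ _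
    · exact ih _ _ (Or.inr (List.cons_ne_nil _ _))

lemma pvToChars_ne_nil (n : Int) : PySem.Int.toChars n ≠ [] := by
  unfold PySem.Int.toChars
  split
  · exact List.cons_ne_nil _ _
  · exact pvToDigitsCore_ne_nil _ _ _ (Or.inl (Nat.succ_pos _))

-- A's loop, characterised against the reference tokens
lemma pvLoopA :
    ∀ (xs : List Int) (text : String) (z : Int), 0 ≤ z →
      ((xs.foldl
        (fun (st : String × Int) element =>
          if element == 0 then
            (st.1, st.2 + 1)
          else
            let text1 := if st.1 ≠ "" then st.1 ++ ", " else st.1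
            let text2 := if st.2 > 0 then text1 ++ "0^" ++ PySem.Int.toStr st.2 ++ ", " else text1
            (text2 ++ PySem.Int.toStr element, 0))
        (text, z)).1).toList
      = pvJoinAcc text.toList (pvFTok z xs) := by
  intro xs
  induction xs with
  | nil => intro text z _; simp [pvFTok, pvJoinAcc]
  | cons x xs ih =>
    intro text z hz
    by_cases hx : x = 0
    · subst hx
      have h1 : ((0 : Int) == 0) = true := by simp
      simp only [List.foldl_cons, h1, if_true]
      rw [ih text (z + 1) (by omega)]
      simp [pvFTok]
    · have hx' : (x == 0) = false := by simp [hx]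
      simp only [List.foldl_cons, hx', Bool.false_eq_true, if_false]
      rw [ih _ 0 le_rfl]
      have hnx := pvToChars_ne_nil x
      cases hr : pvFTok 0 xs with
      | nil =>
        by_cases ht : text = "" <;> by_cases hz0 : 0 < z <;>
          simp [pvJoinAcc, pvFTok, pvSep, hx, ht, hz0, hr,
            PySem.Chars.join_cons_cons, PySem.Chars.join_singleton,
            PySem.Int.toList_toStr, String.toList_eq_nil_iff, List.append_assoc]
      | cons a ts =>
        by_cases ht : text = "" <;> by_cases hz0 : 0 < z <;>
          simp [pvJoinAcc, pvFTok, pvSep, hx, ht, hz0, hr, hnx,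
            PySem.Chars.join_cons_cons,
            PySem.Int.toList_toStr, String.toList_eq_nil_iff, List.append_assoc]

lemma pvFTok_zeros :
    ∀ (zs : List Int) (z : Int) (rest : List Int), (∀ y ∈ zs, y = 0) →
      pvFTok z (zs ++ rest) = pvFTok (z + zs.length) rest := by
  intro zs
  induction zs with
  | nil => intro z rest _; simp
  | cons a as ih =>
    intro z rest h
    have ha : a = 0 := h a (by simp)
    have : pvFTok z ((a :: as) ++ rest) = pvFTok (z + 1) (as ++ rest) := by
      simp [pvFTok, ha]
    rw [this, ih (z + 1) rest (fun y hy => h y (by simp [hy]))]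
    congr 1
    simp only [List.length_cons]
    push_cast
    ring

lemma pvFTok_nonzero_prefix :
    ∀ (r rest : List Int), (∀ y ∈ r, ¬ y = 0) →
      pvFTok 0 (r ++ rest) = r.map PySem.Int.toChars ++ pvFTok 0 rest := by
  intro r
  induction r with
  | nil => intro rest _; simp
  | cons a as ih =>
    intro rest h
    have ha : ¬ a = 0 := h a (by simp)
    simp [pvFTok, ha, ih rest (fun y hy => h y (by simp [hy]))]

lemma pvDropTrailing_cons_of_ne_nil (g : Bool × List Int) (rs : List (Bool × List Int))
    (h : rs ≠ []) : pvDropTrailing (g :: rs) = g :: pvDropTrailing rs := by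
  obtain ⟨a, as, rfl⟩ := List.exists_cons_of_ne_nil h
  unfold pvDropTrailing
  rw [List.getLast?_cons_cons]
  cases hl : (a :: as).getLast? with
  | none => simp
  | some p =>
    obtain ⟨b, r⟩ := p
    cases b <;> simp

lemma pvDropTrailing_cons_false (r : List Int) (rs : List (Bool × List Int)) :
    pvDropTrailing ((false, r) :: rs) = (false, r) :: pvDropTrailing rs := by
  cases rs with
  | nil => rfl
  | cons a as => exact pvDropTrailing_cons_of_ne_nil _ _ (List.cons_ne_nil _ _)

lemma pvTokensB (l : List Int) :
    (pvTokens (pvDropTrailing (pvRuns l))).map String.toList = pvFTok 0 l := by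
  induction l using pvRuns.induct with
  | case1 => rw [pvRuns]; rfl
  | case2 x xs iszero ih =>
    rw [pvRuns]
    by_cases hx : x = 0
    · have hiz : (x == 0) = true := by simp [hx]
      have hizt : iszero = true := hiz
      simp only [hizt, beq_true] at ih
      simp only [hiz, beq_true]
      have hzs : ∀ y ∈ xs.takeWhile (fun y => y == 0), y = 0 := by
        intro y hy
        have := List.mem_takeWhile_imp hy
        simpa using this
      have hsplit : xs.takeWhile (fun y => y == 0) ++ xs.dropWhile (fun y => y == 0) = xs :=
        List.takeWhile_append_dropWhile
      by_cases hre : xs.dropWhile (fun y => y == 0) = []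
      · have hxs : xs.takeWhile (fun y => y == 0) = xs := by
          have h' := hsplit
          rw [hre, List.append_nil] at h'
          exact h'
        rw [hre]
        have hd : pvDropTrailing [(true, x :: xs.takeWhile (fun y => y == 0))] = [] := by
          unfold pvDropTrailing
          simp
        rw [pvRuns, hd]
        have hz := pvFTok_zeros (x :: xs.takeWhile (fun y => y == 0)) 0 []
          (by
            intro y hy
            rcases List.mem_cons.mp hy with h | h
            · exact h ▸ hx
            · exact hzs y h)
        simp only [List.append_nil, hxs] at hz
        have hz' : pvFTok 0 (x :: xs) = [] := by
          rw [hz]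
          simp [pvFTok]
        rw [hz']
        simp [pvTokens]
      · obtain ⟨h, t, hrest⟩ := List.exists_cons_of_ne_nil hre
        have hne : pvRuns (xs.dropWhile (fun y => y == 0)) ≠ [] := by
          rw [hrest, pvRuns]
          exact List.cons_ne_nil _ _
        rw [pvDropTrailing_cons_of_ne_nil _ _ hne]
        have hh : ¬ h = 0 := by
          have h2 := List.head?_dropWhile_not (fun y => y == 0) xs
          rw [hrest] at h2
          simp only [List.head?_cons] at h2
          intro h0
          simp [h0] at h2
        have h0l : ("0^" : String).toList = ['0', '^'] := rfl
        have hlhs : (pvTokens ((true, x :: xs.takeWhile (fun y => y == 0))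
              :: pvDropTrailing (pvRuns (xs.dropWhile (fun y => y == 0))))).map String.toList
            = (['0', '^'] ++ PySem.Int.toChars
                  (((x :: xs.takeWhile (fun y => y == 0)).length : Int)))
              :: pvFTok 0 (xs.dropWhile (fun y => y == 0)) := by
          simp [pvTokens, PySem.Int.toList_toStr, h0l]
          simpa [pvTokens] using ih
        have h1 : pvFTok 0 (x :: xs) = pvFTok 1 xs := by
          simp [pvFTok, hx]
        have h2 := pvFTok_zeros (xs.takeWhile (fun y => y == 0)) 1
          (xs.dropWhile (fun y => y == 0)) hzs
        rw [hsplit] at h2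
        have hp : (0 : Int) < 1 + ((xs.takeWhile (fun y => y == 0)).length : Int) := by
          positivity
        have h3 : pvFTok (1 + ((xs.takeWhile (fun y => y == 0)).length : Int))
              (xs.dropWhile (fun y => y == 0))
            = (['0', '^'] ++ PySem.Int.toChars
                  (1 + ((xs.takeWhile (fun y => y == 0)).length : Int)))
              :: pvFTok 0 (xs.dropWhile (fun y => y == 0)) := by
          rw [hrest]
          simp [pvFTok, hh, hp]
        have hcast : (((x :: xs.takeWhile (fun y => y == 0)).length : Int))
            = 1 + ((xs.takeWhile (fun y => y == 0)).length : Int) := by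
          simp only [List.length_cons]
          push_cast
          ring
        rw [hlhs, h1, h2, h3, hcast]
    · have hiz : (x == 0) = false := by simp [hx]
      have hizf : iszero = false := hiz
      simp only [hizf, beq_false] at ih
      simp only [hiz, beq_false]
      have hnz' : ∀ y ∈ xs.takeWhile (fun y => !(y == 0)), ¬ y = 0 := by
        intro y hy
        have := List.mem_takeWhile_imp hy
        simpa using this
      have hsplit : xs.takeWhile (fun y => !(y == 0)) ++ xs.dropWhile (fun y => !(y == 0)) = xs :=
        List.takeWhile_append_dropWhile
      rw [pvDropTrailing_cons_false]
      have hpre := pvFTok_nonzero_prefix (xs.takeWhile (fun y => !(y == 0)))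
        (xs.dropWhile (fun y => !(y == 0))) hnz'
      rw [hsplit] at hpre
      have hrhs : pvFTok 0 (x :: xs)
          = PySem.Int.toChars x
            :: ((xs.takeWhile (fun y => !(y == 0))).map PySem.Int.toChars
              ++ pvFTok 0 (xs.dropWhile (fun y => !(y == 0)))) := by
        simp [pvFTok, hx, hpre]
      rw [hrhs]
      simp [pvTokens, PySem.Int.toList_toStr, Function.comp_def]
      simpa [pvTokens] using ih

-- ===== VERDICT (by name: the statement is the Claim_ definition above) =====
theorem format_line_vector_spec : Claim_equal_format_line_vector := by
  intro vector _
  unfold Spec_format_line_vector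
  rw [← String.toList_inj]
  have hA := pvLoopA vector "" 0 le_rfl
  unfold format_line_vector format_line_vector_alt
  rw [hA]
  have hsep : ", ".toList = pvSep := rfl
  rw [show (PySem.Str.join ", " (pvTokens (pvDropTrailing (pvRuns vector)))).toList
        = PySem.Chars.join pvSep ((pvTokens (pvDropTrailing (pvRuns vector))).map String.toList) by
      simp [hsep]]
  rw [pvTokensB]
  cases h : pvFTok 0 vector with
  | nil => simp [pvJoinAcc, PySem.Chars.join_nil]
  | cons a ts => simp [pvJoinAcc]
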